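-- pv_equiv track=rewrite | github.com/adamyodinsky/TerminalGPT | terminalgpt/print_utils.py | split_highlighted_string
-- ===== SOURCE A (Python) =====
-- def split_highlighted_string(string):
--     """Split a string into blocks of highlighted syntax text and normal text."""
--
--     result = []
--     start = 0
--     while True:
--         start_block = string.find("```", start)
--         if start_block == -1:
--             result.append(string[start:])
--             break
--         end_block = string.find("```", start_block + 3)
--         if end_block == -1:
--             result.append(string[start:])
--             break
--         result.append(string[start:start_block])
--         result.append(string[start_block : end_block + 3])
--         start = end_block + 3
--     return result
-- ===== SOURCE B (Python) =====
-- def split_highlighted_string(string):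
--     """Split a string into blocks of highlighted syntax text and normal text."""
--     # Pass 1: collect every non-overlapping "```" position once.
--     positions = []
--     p = string.find("```")
--     while p != -1:
--         positions.append(p)
--         p = string.find("```", p + 3)
--     # Pass 2: pair the fences; an odd leftover fence stays in the final tail.
--     result = []
--     start = 0
--     i = 0
--     while i + 1 < len(positions):
--         sb, eb = positions[i], positions[i + 1]
--         result.append(string[start:sb])
--         result.append(string[sb:eb + 3])
--         start = eb + 3
--         i += 2
--     result.append(string[start:])
--     return result
-- ===== Notes on version B (the rewrite author's own statement) =====
-- stated objective: alternative
-- what changed: B first collects all non-overlapping fence positions in one scan into an index table, then pairs them in a separate two-at-a-time pass, instead of interleaving both finds inside one loop.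
import Mathlib
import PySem

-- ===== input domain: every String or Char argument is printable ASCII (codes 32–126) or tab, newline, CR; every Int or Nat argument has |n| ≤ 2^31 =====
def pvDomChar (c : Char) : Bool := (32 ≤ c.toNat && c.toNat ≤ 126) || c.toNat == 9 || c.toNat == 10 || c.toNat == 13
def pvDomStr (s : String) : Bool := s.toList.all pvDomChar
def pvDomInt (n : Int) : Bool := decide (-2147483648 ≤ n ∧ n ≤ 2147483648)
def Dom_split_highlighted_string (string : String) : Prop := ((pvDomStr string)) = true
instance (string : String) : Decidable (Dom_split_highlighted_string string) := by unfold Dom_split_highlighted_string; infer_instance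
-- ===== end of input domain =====

-- B changes the decomposition: one scan precomputes all fence positions, a second pass pairs them
-- (objective: alternative; same asymptotic cost).

-- ===== PORT A =====

def pvTick : List Char := ['`', '`', '`']

-- Bounds of a successful find("```", start): the hit is ≥ start and its 3 chars fit in cs.
theorem pvFound_bounds (cs : List Char) (k : Nat) (hk : k ≤ cs.length)
    (h : PySem.Chars.findFrom cs pvTick (k : Int) none ≠ -1) :
    0 ≤ PySem.Chars.findFrom cs pvTick (k : Int) none ∧
    k ≤ (PySem.Chars.findFrom cs pvTick (k : Int) none).toNat ∧
    (PySem.Chars.findFrom cs pvTick (k : Int) none).toNat + 3 ≤ cs.length := by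
  obtain ⟨h1, h2, -⟩ := PySem.Chars.findFrom_natCast_spec cs pvTick k hk h
  have hlen := h2.length_le
  rw [List.length_drop] at hlen
  have ht : pvTick.length = 3 := rfl
  rw [ht] at hlen
  omega

-- Bounds for one full iteration of A's loop (both finds succeed): the new start eb+3 fits.
theorem pvStep_bounds (cs : List Char) (start : Nat) (h : start ≤ cs.length)
    (hsb : PySem.Chars.findFrom cs pvTick (start : Int) none ≠ -1)
    (heb : PySem.Chars.findFrom cs pvTick (PySem.Chars.findFrom cs pvTick (start : Int) none + 3) none ≠ -1) :
    start < (PySem.Chars.findFrom cs pvTick (PySem.Chars.findFrom cs pvTick (start : Int) none + 3) none + 3).toNat ∧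
    (PySem.Chars.findFrom cs pvTick (PySem.Chars.findFrom cs pvTick (start : Int) none + 3) none + 3).toNat ≤ cs.length := by
  obtain ⟨hnn, hge, hfit⟩ := pvFound_bounds cs start h hsb
  have hcast : PySem.Chars.findFrom cs pvTick (start : Int) none + 3
      = (((PySem.Chars.findFrom cs pvTick (start : Int) none).toNat + 3 : Nat) : Int) := by omega
  simp only [hcast] at heb ⊢
  obtain ⟨hnn2, hge2, hfit2⟩ :=
    pvFound_bounds cs ((PySem.Chars.findFrom cs pvTick (start : Int) none).toNat + 3) (by omega) heb
  omega

-- A's loop: interleaved finds, appending segments as it goes (port of the while-True loop).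
def pvALoop (cs : List Char) (start : Nat) (h : start ≤ cs.length) : List (List Char) :=
  -- start_block = string.find("```", start)
  if hsb : PySem.Chars.findFrom cs pvTick (start : Int) none = -1 then
    [PySem.Chars.slice cs (some (start : Int)) none]
  -- end_block = string.find("```", start_block + 3)
  else if heb : PySem.Chars.findFrom cs pvTick
      (PySem.Chars.findFrom cs pvTick (start : Int) none + 3) none = -1 then
    [PySem.Chars.slice cs (some (start : Int)) none]
  else
    PySem.Chars.slice cs (some (start : Int)) (some (PySem.Chars.findFrom cs pvTick (start : Int) none)) ::
    PySem.Chars.slice cs (some (PySem.Chars.findFrom cs pvTick (start : Int) none))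
      (some (PySem.Chars.findFrom cs pvTick (PySem.Chars.findFrom cs pvTick (start : Int) none + 3) none + 3)) ::
    pvALoop cs
      (PySem.Chars.findFrom cs pvTick (PySem.Chars.findFrom cs pvTick (start : Int) none + 3) none + 3).toNat
      (pvStep_bounds cs start h hsb heb).2
  termination_by cs.length - start
  decreasing_by
    have := pvStep_bounds cs start h hsb heb
    omega

def split_highlighted_string (string : String) : List String :=
  (pvALoop string.toList 0 (Nat.zero_le _)).map String.ofList

-- ===== PORT B =====

-- Pass 1: every non-overlapping "```" position (port of B's first while loop).
def pvScan (cs : List Char) (start : Nat) (h : start ≤ cs.length) : List Nat :=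
  if hp : PySem.Chars.findFrom cs pvTick (start : Int) none = -1 then []
  else
    (PySem.Chars.findFrom cs pvTick (start : Int) none).toNat ::
    pvScan cs ((PySem.Chars.findFrom cs pvTick (start : Int) none).toNat + 3)
      (pvFound_bounds cs start h hp).2.2
  termination_by cs.length - start
  decreasing_by
    have := pvFound_bounds cs start h hp
    omega

-- Pass 2: pair the positions two at a time (port of B's second while loop).
def pvPairLoop (cs : List Char) : List Nat → Nat → List (List Char)
  | sb :: eb :: rest, start =>
      PySem.Chars.slice cs (some (start : Int)) (some (sb : Int)) ::
      PySem.Chars.slice cs (some (sb : Int)) (some ((eb : Int) + 3)) ::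
      pvPairLoop cs rest (eb + 3)
  | _, start => [PySem.Chars.slice cs (some (start : Int)) none]

def split_highlighted_string_alt (string : String) : List String :=
  (pvPairLoop string.toList (pvScan string.toList 0 (Nat.zero_le _)) 0).map String.ofList

-- ===== PRECONDITION & SPEC =====
def Spec_split_highlighted_string (string : String) (out : List String) : Prop := out = split_highlighted_string_alt string
instance (string : String) (out : List String) : Decidable (Spec_split_highlighted_string string out) := by unfold Spec_split_highlighted_string; infer_instance

-- ===== CLAIM (what is proved, stated in full; the proofs are below) =====
def Claim_equal_split_highlighted_string : Prop := ∀ (string : String), Dom_split_highlighted_string string → Spec_split_highlighted_string string (split_highlighted_string string)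

-- ===== LEMMAS AND PROOFS =====

theorem pvLoop_eq (cs : List Char) (start : Nat) (h : start ≤ cs.length) :
    pvALoop cs start h = pvPairLoop cs (pvScan cs start h) start := by
  induction start, h using pvALoop.induct with
  | case1 start h hsb =>
      rw [pvALoop, pvScan]
      simp only [dif_pos hsb, pvPairLoop]
  | case2 start h hsb heb =>
      obtain ⟨hnn, hge, hfit⟩ := pvFound_bounds cs start h hsb
      have hcast : PySem.Chars.findFrom cs pvTick (start : Int) none + 3
          = (((PySem.Chars.findFrom cs pvTick (start : Int) none).toNat + 3 : Nat) : Int) := by omega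
      rw [pvALoop, pvScan]
      simp only [hcast] at heb ⊢
      simp only [dif_neg hsb, dif_pos heb]
      rw [pvScan]
      simp only [dif_pos heb, pvPairLoop]
  | case3 start h hsb heb ih =>
      obtain ⟨hnn, hge, hfit⟩ := pvFound_bounds cs start h hsb
      have hcast : PySem.Chars.findFrom cs pvTick (start : Int) none + 3
          = (((PySem.Chars.findFrom cs pvTick (start : Int) none).toNat + 3 : Nat) : Int) := by omega
      rw [pvALoop, pvScan]
      simp only [hcast] at heb ih ⊢
      obtain ⟨hnn2, hge2, hfit2⟩ :=
        pvFound_bounds cs ((PySem.Chars.findFrom cs pvTick (start : Int) none).toNat + 3) (by omega) heb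
      simp only [dif_neg hsb, dif_neg heb]
      rw [pvScan]
      simp only [dif_neg heb, pvPairLoop]
      rw [ih]
      have e1 : (((PySem.Chars.findFrom cs pvTick (start : Int) none).toNat : Nat) : Int)
          = PySem.Chars.findFrom cs pvTick (start : Int) none := by omega
      have e2 : (((PySem.Chars.findFrom cs pvTick
            (((PySem.Chars.findFrom cs pvTick (start : Int) none).toNat + 3 : Nat) : Int) none).toNat : Nat) : Int)
          = PySem.Chars.findFrom cs pvTick
            (((PySem.Chars.findFrom cs pvTick (start : Int) none).toNat + 3 : Nat) : Int) none := by omega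
      have e3 : (PySem.Chars.findFrom cs pvTick
            (((PySem.Chars.findFrom cs pvTick (start : Int) none).toNat + 3 : Nat) : Int) none + 3).toNat
          = (PySem.Chars.findFrom cs pvTick
            (((PySem.Chars.findFrom cs pvTick (start : Int) none).toNat + 3 : Nat) : Int) none).toNat + 3 := by omega
      simp only [e1, e2, e3]

-- ===== VERDICT (by name: the statement is the Claim_ definition above) =====
theorem split_highlighted_string_spec : Claim_equal_split_highlighted_string := by
  intro string _
  unfold Spec_split_highlighted_string split_highlighted_string split_highlighted_string_alt
  rw [pvLoop_eq]
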